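-- pv_equiv track=rewrite | github.com/Sonaltk/rag-pdf-assistant | phase3_evaluation/golden_dataset/curator.py | _is_yes_no
-- ===== SOURCE A (Python) =====
-- from typing import List, Dict, Tuple
--
-- def _is_yes_no(pair: Dict) -> Tuple[bool, str]:
--     """Detect yes/no questions — not useful for evaluation."""
--     q = pair.get("question", "").lower().strip()
--     yes_no_starters = ["is ", "are ", "was ", "were ", "do ", "does ",
--                        "did ", "can ", "could ", "should ", "would ",
--                        "has ", "have ", "had "]
--     for starter in yes_no_starters:
--         if q.startswith(starter):
--             return True, "yes_no_question"
--     return False, ""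
-- ===== SOURCE B (Python) =====
-- def _is_yes_no(pair):
--     """Detect yes/no questions — not useful for evaluation."""
--     q = pair.get("question", "").lower().strip()
--     word, sep, _ = q.partition(" ")
--     if sep == " " and word in {"is", "are", "was", "were", "do", "does",
--                                "did", "can", "could", "should", "would",
--                                "has", "have", "had"}:
--         return True, "yes_no_question"
--     return False, ""
-- ===== Notes on version B (the rewrite author's own statement) =====
-- stated objective: idiomatic
-- what changed: Replaces the 14-iteration per-prefix startswith loop by one q.partition(' ') tokenization plus a single membership test of the first word in a set of bare starter words.
import Mathlib
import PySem

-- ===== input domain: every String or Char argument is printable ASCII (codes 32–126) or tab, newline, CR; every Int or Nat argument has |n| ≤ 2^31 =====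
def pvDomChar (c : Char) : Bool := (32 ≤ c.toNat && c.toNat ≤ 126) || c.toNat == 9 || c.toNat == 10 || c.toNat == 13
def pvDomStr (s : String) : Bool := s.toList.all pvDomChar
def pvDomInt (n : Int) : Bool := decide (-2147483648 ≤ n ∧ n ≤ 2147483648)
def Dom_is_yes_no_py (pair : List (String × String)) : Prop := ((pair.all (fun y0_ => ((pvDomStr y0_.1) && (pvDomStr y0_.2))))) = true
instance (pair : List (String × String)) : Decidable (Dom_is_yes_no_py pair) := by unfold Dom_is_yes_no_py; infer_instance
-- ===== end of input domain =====

-- B replaces A's per-prefix startswith loop by one split at the first space plus a single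
-- membership test in the set of bare yes/no starter words (objective: idiomatic; no speed claim).

-- ===== PORT A =====
-- the 'for starter in yes_no_starters: if q.startswith(starter): return …' loop
def ynLoopA (q : String) : List String → Bool × String
  | [] => (false, "")
  | s :: rest => if PySem.Str.startswith q s then (true, "yes_no_question") else ynLoopA q rest

def is_yes_no_py (pair : List (String × String)) : Bool × String :=
  let q := PySem.Str.strip (PySem.Str.lower ((PySem.Dict.ofList pair).getD "question" ""))
  ynLoopA q ["is ", "are ", "was ", "were ", "do ", "does ",
             "did ", "can ", "could ", "should ", "would ",
             "has ", "have ", "had "]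

-- ===== PORT B =====
-- hand port of `word, sep, _ = q.partition(" ")` (exact: 'word' is q up to the first
-- space; sep == " " iff a space occurs in q, i.e. iff 'word' is shorter than q)
def is_yes_no_py_alt (pair : List (String × String)) : Bool × String :=
  let q := PySem.Str.strip (PySem.Str.lower ((PySem.Dict.ofList pair).getD "question" ""))
  let l := q.toList
  let word := l.takeWhile (fun c => c ≠ ' ')
  if word.length < l.length ∧
     word ∈ (["is", "are", "was", "were", "do", "does", "did", "can", "could",
              "should", "would", "has", "have", "had"].map String.toList)
  then (true, "yes_no_question") else (false, "")

-- ===== PRECONDITION & SPEC =====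
def Spec_is_yes_no_py (pair : List (String × String)) (out : Bool × String) : Prop := out = is_yes_no_py_alt pair
instance (pair : List (String × String)) (out : Bool × String) : Decidable (Spec_is_yes_no_py pair out) := by unfold Spec_is_yes_no_py; infer_instance

-- ===== CLAIM (what is proved, stated in full; the proofs are below) =====
def Claim_equal_is_yes_no_py : Prop := ∀ (pair : List (String × String)), Dom_is_yes_no_py pair → Spec_is_yes_no_py pair (is_yes_no_py pair)

-- ===== LEMMAS AND PROOFS =====

-- 'l starts with w ++ [' ']' ↔ 'the chunk before the first space is exactly w, and shorter than l'
theorem startsWith_space_iff (w : List Char) (hw : ∀ c ∈ w, c ≠ ' ') (l : List Char) :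
    (w ++ [' ']) <+: l ↔ (l.takeWhile (fun c => c ≠ ' ') = w ∧ w.length < l.length) := by
  induction w generalizing l with
  | nil =>
    cases l with
    | nil => simp
    | cons c t =>
      by_cases hc : c = ' ' <;>
        simp [List.takeWhile_cons, hc, List.cons_prefix_iff, Nat.succ_pos]
  | cons a w' ih =>
    have ha : a ≠ ' ' := hw a (by simp)
    have hw' : ∀ c ∈ w', c ≠ ' ' := fun c hc => hw c (by simp [hc])
    cases l with
    | nil => simp
    | cons c t =>
      by_cases hc : c = a
      · subst hc
        simp only [List.cons_append, List.cons_prefix_cons, true_and]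
        rw [ih hw' t]
        simp [List.takeWhile_cons, ha, Nat.succ_lt_succ_iff]
      · constructor
        · rintro h
          rw [List.cons_append, List.cons_prefix_cons] at h
          exact absurd h.1.symm hc
        · rintro ⟨h1, _⟩
          exfalso
          by_cases hcs : c = ' '
          · simp [List.takeWhile_cons, hcs] at h1
          · simp [List.takeWhile_cons, hcs] at h1
            exact hc h1.1

theorem is_yes_no_py_spec : Claim_equal_is_yes_no_py := by
  intro pair _
  unfold Spec_is_yes_no_py is_yes_no_py is_yes_no_py_alt
  set q := PySem.Str.strip (PySem.Str.lower ((PySem.Dict.ofList pair).getD "question" "")) with hq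
  set l := q.toList with hl
  set tw := l.takeWhile (fun c => c ≠ ' ') with htw
  have key : ∀ (s : String) (w : List Char), s.toList = w ++ [' '] → (∀ c ∈ w, c ≠ ' ') →
      (PySem.Str.startswith q s = true ↔ (tw = w ∧ tw.length < l.length)) := by
    intro s w hs hw
    rw [PySem.Str.startswith_eq, PySem.Chars.startswith_iff, hs, ← hl,
        startsWith_space_iff w hw l, htw]
    constructor
    · rintro ⟨h1, h2⟩; exact ⟨h1, by rw [h1]; exact h2⟩
    · rintro ⟨h1, h2⟩; exact ⟨h1, h1 ▸ h2⟩
  have k1 := key "is " "is".toList (by decide) (by simp)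
  have k2 := key "are " "are".toList (by decide) (by simp)
  have k3 := key "was " "was".toList (by decide) (by simp)
  have k4 := key "were " "were".toList (by decide) (by simp)
  have k5 := key "do " "do".toList (by decide) (by simp)
  have k6 := key "does " "does".toList (by decide) (by simp)
  have k7 := key "did " "did".toList (by decide) (by simp)
  have k8 := key "can " "can".toList (by decide) (by simp)
  have k9 := key "could " "could".toList (by decide) (by simp)
  have k10 := key "should " "should".toList (by decide) (by simp)
  have k11 := key "would " "would".toList (by decide) (by simp)
  have k12 := key "has " "has".toList (by decide) (by simp)
  have k13 := key "have " "have".toList (by decide) (by simp)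
  have k14 := key "had " "had".toList (by decide) (by simp)
  simp only [ynLoopA]
  by_cases hB : tw.length < l.length ∧ tw ∈ (["is", "are", "was", "were", "do", "does", "did", "can", "could",
             "should", "would", "has", "have", "had"].map String.toList)
  · rw [if_pos hB]
    obtain ⟨hlen, hmem⟩ := hB
    simp only [List.map_cons, List.map_nil, List.mem_cons, List.not_mem_nil, or_false] at hmem
    rcases hmem with h|h|h|h|h|h|h|h|h|h|h|h|h|h <;> simp_all [k1, k2, k3, k4, k5, k6, k7, k8, k9, k10, k11, k12, k13, k14]
  · rw [if_neg hB]
    push_neg at hB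
    have hfalse : ∀ (s : String) (w : List Char), s.toList = w ++ [' '] → (∀ c ∈ w, c ≠ ' ') →
        w ∈ (["is", "are", "was", "were", "do", "does", "did", "can", "could",
             "should", "would", "has", "have", "had"].map String.toList) →
        PySem.Str.startswith q s = false := by
      intro s w hs hw hmemw
      rw [Bool.eq_false_iff]
      intro hcon
      obtain ⟨h1, h2⟩ := (key s w hs hw).1 hcon
      have hmem' : tw ∈ (["is", "are", "was", "were", "do", "does", "did", "can", "could",
             "should", "would", "has", "have", "had"].map String.toList) := by rw [h1]; exact hmemw
      exact absurd hmem' (hB h2)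
    have f1 := hfalse "is " "is".toList (by decide) (by simp) (by simp)
    have f2 := hfalse "are " "are".toList (by decide) (by simp) (by simp)
    have f3 := hfalse "was " "was".toList (by decide) (by simp) (by simp)
    have f4 := hfalse "were " "were".toList (by decide) (by simp) (by simp)
    have f5 := hfalse "do " "do".toList (by decide) (by simp) (by simp)
    have f6 := hfalse "does " "does".toList (by decide) (by simp) (by simp)
    have f7 := hfalse "did " "did".toList (by decide) (by simp) (by simp)
    have f8 := hfalse "can " "can".toList (by decide) (by simp) (by simp)
    have f9 := hfalse "could " "could".toList (by decide) (by simp) (by simp)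
    have f10 := hfalse "should " "should".toList (by decide) (by simp) (by simp)
    have f11 := hfalse "would " "would".toList (by decide) (by simp) (by simp)
    have f12 := hfalse "has " "has".toList (by decide) (by simp) (by simp)
    have f13 := hfalse "have " "have".toList (by decide) (by simp) (by simp)
    have f14 := hfalse "had " "had".toList (by decide) (by simp) (by simp)
    simp_all [f1, f2, f3, f4, f5, f6, f7, f8, f9, f10, f11, f12, f13, f14]
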